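-- pv_equiv track=rewrite | github.com/Jadiker/plain-english-legalese | search.py | search_term
-- ===== SOURCE A (Python) =====
-- class TermNotFound(ValueError):
-- 	def __init__(self, close_terms):
-- 		super().__init__()
-- 		self.close_terms = close_terms
--
-- def search_term(term, lawdict):
-- 	if term in lawdict.keys():
-- 		return (term, lawdict[term])
-- 	else:
-- 		keyList = lawdict.keys()
-- 		#editList = map(lambda x, y: levenshteinDistance(x, y), keyList, term)
-- 		editList = [levenshteinDistance(val, term) for val in lawdict.keys()]
--
-- 	if(min(editList) > 2 and min(editList) < 4):
-- 		raise TermNotFound([list(keyList)[editList.index(min(editList))]])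
-- 	elif(min(editList) > 4):
-- 		raise TermNotFound([])
-- 	else:
-- 		term_found = list(keyList)[editList.index(min(editList))]
-- 		return (term_found, lawdict[term_found])
--
-- def levenshteinDistance(s1, s2):
--     if len(s1) > len(s2):
--         s1, s2 = s2, s1
--
--     distances = range(len(s1) + 1)
--     for i2, c2 in enumerate(s2):
--         distances_ = [i2+1]
--         for i1, c1 in enumerate(s1):
--             if c1 == c2:
--                 distances_.append(distances[i1])
--             else:
--                 distances_.append(1 + min((distances[i1], distances[i1 + 1], distances_[-1])))
--         distances = distances_
--     return distances[-1]
-- ===== SOURCE B (Python) =====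
-- class TermNotFound(ValueError):
--     def __init__(self, close_terms):
--         super().__init__()
--         self.close_terms = close_terms
--
-- def levenshteinDistance(s1, s2):
--     # top-down recursion on prefix lengths, memoised by hand (no imports in this module)
--     memo = {}
--     def lev(i, j):
--         if i == 0:
--             return j
--         if j == 0:
--             return i
--         r = memo.get((i, j))
--         if r is not None:
--             return r
--         if s1[i - 1] == s2[j - 1]:
--             r = lev(i - 1, j - 1)
--         else:
--             r = 1 + min(lev(i - 1, j), lev(i, j - 1), lev(i - 1, j - 1))
--         memo[(i, j)] = r
--         return r
--     return lev(len(s1), len(s2))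
--
-- def search_term(term, lawdict):
--     if term in lawdict:
--         return (term, lawdict[term])
--     best_key = None
--     best_dist = None
--     for key in lawdict:
--         d = levenshteinDistance(key, term)
--         if best_dist is None or d < best_dist:
--             best_key, best_dist = key, d
--     if best_dist is None:
--         raise ValueError("search_term: empty dictionary")
--     if 2 < best_dist < 4:
--         raise TermNotFound([best_key])
--     elif best_dist > 4:
--         raise TermNotFound([])
--     else:
--         return (best_key, lawdict[best_key])
-- ===== Notes on version B (the rewrite author's own statement) =====
-- stated objective: alternative
-- what changed: A computes each distance with a bottom-up rolling-row DP (after swapping to the shorter string), collects all distances in a list and re-scans it with min() and .index(); B computes each distance by top-down recursion on prefix lengths memoised in a dict (no swap, no rows) and selects the answer in one pass keeping the best (key, distance) so far, updating only on a strictly smaller distance so the first minimum wins.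
import Mathlib
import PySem

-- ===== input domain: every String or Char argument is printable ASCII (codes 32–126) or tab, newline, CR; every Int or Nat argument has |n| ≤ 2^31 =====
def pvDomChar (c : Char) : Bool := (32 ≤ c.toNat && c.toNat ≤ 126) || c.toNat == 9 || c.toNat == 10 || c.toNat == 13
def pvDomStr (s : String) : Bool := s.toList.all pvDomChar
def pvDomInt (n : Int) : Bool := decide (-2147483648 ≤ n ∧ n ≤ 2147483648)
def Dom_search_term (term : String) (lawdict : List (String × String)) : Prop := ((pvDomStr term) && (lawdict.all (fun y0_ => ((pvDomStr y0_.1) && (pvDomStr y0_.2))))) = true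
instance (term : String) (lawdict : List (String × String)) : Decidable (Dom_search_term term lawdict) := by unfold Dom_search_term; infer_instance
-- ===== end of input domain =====

-- B replaces A's bottom-up rolling-row Levenshtein DP by top-down memoised recursion on prefix
-- lengths, and A's distance-list plus min()/index() scans by one pass keeping the best (key,
-- distance) so far (strict < update, so the first minimum wins); a different algorithm, same results.

-- ===== PORT A =====
-- module helper of A: Levenshtein DP, row by row over the longer string after swapping
def levenshteinDistance (s1 s2 : String) : Int :=
  let l1 := s1.toList
  let l2 := s2.toList
  let (t1, t2) := if l1.length > l2.length then (l2, l1) else (l1, l2)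
  let init : List Int := (List.range (t1.length + 1)).map (fun n => (n : Int))
  let final := (PySem.List.enumerate t2).foldl (fun dists (p : Int × Char) =>
      (PySem.List.enumerate t1).foldl (fun ds (q : Int × Char) =>
          if q.2 = p.2 then ds ++ [PySem.List.pyGetD dists q.1 0]
          else ds ++ [1 + min (min (PySem.List.pyGetD dists q.1 0)
                                   (PySem.List.pyGetD dists (q.1 + 1) 0))
                              (PySem.List.pyGetD ds (-1) 0)])
        [p.1 + 1])
    init
  PySem.List.pyGetD final (-1) 0

def search_term (term : String) (lawdict : List (String × String)) : String × String :=
  let d := PySem.Dict.ofList lawdict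
  if d.contains term then (term, d.getD term "")
  else
    let keyList := d.keys
    let editList := keyList.map (fun v => levenshteinDistance v term)
    let m := (PySem.List.min? editList (fun y => y)).getD 0   -- min([]) raises ValueError: excluded by Pre_
    if m > 2 ∧ m < 4 then ("", "")                            -- raise TermNotFound([closest]): excluded by Pre_
    else if m > 4 then ("", "")                               -- raise TermNotFound([]): excluded by Pre_
    else
      let term_found := ((PySem.List.index? editList m).bind (fun i => keyList[i]?)).getD ""
      (term_found, d.getD term_found "")

-- ===== PORT B =====
-- Source B's inner lev(i, j): top-down recursion on prefix lengths, threading the memo dict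
def levGo (a b : List Char) (i j : Nat) (memo : PySem.Dict (Int × Int) Int) :
    Int × PySem.Dict (Int × Int) Int :=
  if i = 0 then ((j : Int), memo)
  else if j = 0 then ((i : Int), memo)
  else
    match memo.get? ((i : Int), (j : Int)) with
    | some r => (r, memo)
    | none =>
      if PySem.List.pyGet? a ((i : Int) - 1) = PySem.List.pyGet? b ((j : Int) - 1) then
        let p := levGo a b (i - 1) (j - 1) memo
        (p.1, p.2.insert ((i : Int), (j : Int)) p.1)
      else
        let p1 := levGo a b (i - 1) j memo
        let p2 := levGo a b i (j - 1) p1.2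
        let p3 := levGo a b (i - 1) (j - 1) p2.2
        let r := 1 + min (min p1.1 p2.1) p3.1
        (r, p3.2.insert ((i : Int), (j : Int)) r)
termination_by i + j
decreasing_by all_goals omega

-- Source B's levenshteinDistance: lev(len(s1), len(s2)) with an empty memo
def levenshteinDistance_alt (s1 s2 : String) : Int :=
  (levGo s1.toList s2.toList s1.toList.length s2.toList.length PySem.Dict.empty).1

-- Source B's loop body: keep the best (key, distance) so far; strictly smaller wins, so the first minimum is kept
def pvStep (term : String) (acc : Option (String × Int)) (k : String) : Option (String × Int) :=
  let dk := levenshteinDistance_alt k term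
  match acc with
  | none => some (k, dk)
  | some (bk, bd) => if dk < bd then some (k, dk) else some (bk, bd)

def search_term_alt (term : String) (lawdict : List (String × String)) : String × String :=
  let d := PySem.Dict.ofList lawdict
  if d.contains term then (term, d.getD term "")
  else
    match d.keys.foldl (pvStep term) none with
    | none => ("", "")                                        -- raise ValueError: excluded by Pre_
    | some (bk, bd) =>
      if bd > 2 ∧ bd < 4 then ("", "")                        -- raise TermNotFound([bk]): excluded by Pre_
      else if bd > 4 then ("", "")                            -- raise TermNotFound([]): excluded by Pre_
      else (bk, d.getD bk "")

-- ===== PRECONDITION & SPEC =====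
-- Pre_ holds exactly where Python A returns normally: the term is a key, or the minimal Levenshtein
-- distance to a key is ≤ 2 or exactly 4 (distance 3 or > 4 raises TermNotFound; an empty dict raises ValueError).
def Pre_search_term (term : String) (lawdict : List (String × String)) : Prop :=
  let keys := (PySem.Dict.ofList lawdict).keys
  term ∈ keys
  ∨ (∃ k ∈ keys, levenshteinDistance k term ≤ 2)
  ∨ ((∀ k ∈ keys, 4 ≤ levenshteinDistance k term) ∧ ∃ k ∈ keys, levenshteinDistance k term = 4)
instance (term : String) (lawdict : List (String × String)) : Decidable (Pre_search_term term lawdict) := by unfold Pre_search_term; infer_instance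

def pvWitness_search_term : String × (List (String × String)) := ("cat", [("cart", "a vehicle"), ("cat", "an animal")])

def Spec_search_term (term : String) (lawdict : List (String × String)) (out : String × String) : Prop := out = search_term_alt term lawdict
instance (term : String) (lawdict : List (String × String)) (out : String × String) : Decidable (Spec_search_term term lawdict out) := by unfold Spec_search_term; infer_instance

-- ===== CLAIM (what is proved, stated in full; the proofs are below) =====
def Claim_equal_search_term : Prop := ∀ (term : String) (lawdict : List (String × String)), Dom_search_term term lawdict → Pre_search_term term lawdict → Spec_search_term term lawdict (search_term term lawdict)

-- ===== LEMMAS AND PROOFS =====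

-- the Levenshtein prefix-distance recurrence both implementations compute
def levT (a b : List Char) (i j : Nat) : Int :=
  if i = 0 then (j : Int)
  else if j = 0 then (i : Int)
  else if PySem.List.pyGet? a ((i : Int) - 1) = PySem.List.pyGet? b ((j : Int) - 1) then
    levT a b (i - 1) (j - 1)
  else 1 + min (min (levT a b (i - 1) j) (levT a b i (j - 1))) (levT a b (i - 1) (j - 1))
termination_by i + j
decreasing_by all_goals omega

-- every memo entry is a correct levT value
def MemoInv (a b : List Char) (memo : PySem.Dict (Int × Int) Int) : Prop :=
  ∀ p v, memo.get? p = some v → ∃ i j : Nat, p = ((i : Int), (j : Int)) ∧ v = levT a b i j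

lemma levT_zero_left (a b : List Char) (j : Nat) : levT a b 0 j = (j : Int) := by
  rw [levT]; simp

lemma levT_zero_right (a b : List Char) (i : Nat) : levT a b i 0 = (i : Int) := by
  rw [levT]; by_cases hi : i = 0 <;> simp [hi]

lemma levT_pos (a b : List Char) (i j : Nat) (hi : i ≠ 0) (hj : j ≠ 0) :
    levT a b i j =
      if PySem.List.pyGet? a ((i : Int) - 1) = PySem.List.pyGet? b ((j : Int) - 1) then
        levT a b (i - 1) (j - 1)
      else 1 + min (min (levT a b (i - 1) j) (levT a b i (j - 1))) (levT a b (i - 1) (j - 1)) := by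
  conv_lhs => rw [levT]
  simp [hi, hj]

lemma levT_symm (a b : List Char) (i j : Nat) : levT a b i j = levT b a j i := by
  induction hn : i + j using Nat.strong_induction_on generalizing i j with
  | _ n ih =>
  subst hn
  by_cases hi : i = 0
  · subst hi; rw [levT_zero_left, levT_zero_right]
  · by_cases hj : j = 0
    · subst hj; rw [levT_zero_left, levT_zero_right]
    · rw [levT_pos a b i j hi hj, levT_pos b a j i hj hi]
      by_cases hc : PySem.List.pyGet? a ((i : Int) - 1) = PySem.List.pyGet? b ((j : Int) - 1)
      · rw [if_pos hc, if_pos hc.symm]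
        exact ih _ (by omega) _ _ rfl
      · rw [if_neg hc, if_neg (fun h => hc h.symm)]
        rw [ih ((i-1) + j) (by omega) (i-1) j rfl,
            ih (i + (j-1)) (by omega) i (j-1) rfl,
            ih ((i-1) + (j-1)) (by omega) (i-1) (j-1) rfl]
        rw [min_comm (levT b a j (i-1)) (levT b a (j-1) i)]

lemma memoInv_insert (a b : List Char) (memo : PySem.Dict (Int × Int) Int)
    (h : MemoInv a b memo) (i j : Nat) :
    MemoInv a b (memo.insert ((i : Int), (j : Int)) (levT a b i j)) := by
  intro p v hv
  rw [PySem.Dict.get?_insert] at hv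
  split_ifs at hv with hp
  · exact ⟨i, j, hp, (Option.some_inj.mp hv).symm⟩
  · exact h p v hv

lemma levGo_correct (a b : List Char) (i j : Nat) (memo : PySem.Dict (Int × Int) Int)
    (h : MemoInv a b memo) :
    (levGo a b i j memo).1 = levT a b i j ∧ MemoInv a b (levGo a b i j memo).2 := by
  induction hn : i + j using Nat.strong_induction_on generalizing i j memo with
  | _ n ih =>
  subst hn
  rw [levGo]
  by_cases hi : i = 0
  · subst hi; simp [levT]
    exact h
  · by_cases hj : j = 0
    · subst hj
      simp only [hi, if_false, if_true]
      constructor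
      · rw [levT]; simp [hi]
      · exact h
    · simp only [hi, hj, if_false]
      rcases hm : memo.get? ((i : Int), (j : Int)) with _ | r
      · simp only
        by_cases hc : PySem.List.pyGet? a ((i : Int) - 1) = PySem.List.pyGet? b ((j : Int) - 1)
        · simp only [hc, if_true]
          obtain ⟨h1, h2⟩ := ih _ (by omega) (i-1) (j-1) memo h rfl
          refine ⟨?_, ?_⟩
          · simp only [h1, levT_pos a b i j hi hj, hc, if_true]
          · simp only [h1]
            have := memoInv_insert a b _ h2 i j
            rw [levT_pos a b i j hi hj, if_pos hc] at this
            exact this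
        · simp only [hc, if_false]
          obtain ⟨h1, h2⟩ := ih _ (by omega) (i-1) j memo h rfl
          obtain ⟨h3, h4⟩ := ih _ (by omega) i (j-1) _ h2 rfl
          obtain ⟨h5, h6⟩ := ih _ (by omega) (i-1) (j-1) _ h4 rfl
          refine ⟨?_, ?_⟩
          · simp only [h1, h3, h5, levT_pos a b i j hi hj, hc, if_false]
          · simp only [h1, h3, h5]
            have := memoInv_insert a b _ h6 i j
            rw [levT_pos a b i j hi hj, if_neg hc] at this
            exact this
      · simp only
        obtain ⟨i', j', hp, hv⟩ := h _ _ hm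
        have hpi : i = i' := by
          have := congrArg Prod.fst hp; simp at this; exact_mod_cast this
        have hpj : j = j' := by
          have := congrArg Prod.snd hp; simp at this; exact_mod_cast this
        subst hpi; subst hpj
        exact ⟨hv, h⟩

def pvRow (t1 t2 : List Char) (j : Nat) : List Int :=
  (List.range (t1.length + 1)).map (fun i => levT t1 t2 i j)

lemma pvRow_get (t1 t2 : List Char) (j i : Nat) (hi : i ≤ t1.length) :
    PySem.List.pyGetD (pvRow t1 t2 j) (i : Int) 0 = levT t1 t2 i j := by
  rw [PySem.List.pyGetD_natCast, pvRow]
  rw [List.getD_eq_getElem?_getD, List.getElem?_map, List.getElem?_range (by omega)]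
  simp

lemma pvStep_succ (t1 t2 : List Char) (j k : Nat) (hj : j < t2.length) (hk : k < t1.length) :
    (if t1[k] = t2[j] then
        ((List.range (k + 1)).map (fun i => levT t1 t2 i (j + 1))) ++
          [PySem.List.pyGetD (pvRow t1 t2 j) ((k : Int)) 0]
      else
        ((List.range (k + 1)).map (fun i => levT t1 t2 i (j + 1))) ++
          [1 + min (min (PySem.List.pyGetD (pvRow t1 t2 j) ((k : Int)) 0)
                        (PySem.List.pyGetD (pvRow t1 t2 j) ((k : Int) + 1) 0))
                   (PySem.List.pyGetD ((List.range (k + 1)).map (fun i => levT t1 t2 i (j + 1))) (-1) 0)])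
    = (List.range (k + 1 + 1)).map (fun i => levT t1 t2 i (j + 1)) := by
  have hlast : PySem.List.pyGetD ((List.range (k + 1)).map (fun i => levT t1 t2 i (j + 1))) (-1) 0
      = levT t1 t2 k (j + 1) := by
    rw [List.range_succ, List.map_append]
    exact PySem.List.pyGetD_neg_one_append_singleton
      ((List.range k).map (fun i => levT t1 t2 i (j + 1))) (levT t1 t2 k (j + 1)) 0
  have h1 : PySem.List.pyGetD (pvRow t1 t2 j) ((k : Int)) 0 = levT t1 t2 k j :=
    pvRow_get t1 t2 j k (by omega)
  have h2 : PySem.List.pyGetD (pvRow t1 t2 j) ((k : Int) + 1) 0 = levT t1 t2 (k + 1) j := by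
    have : ((k : Int) + 1) = ((k + 1 : Nat) : Int) := by push_cast; ring
    rw [this]; exact pvRow_get t1 t2 j (k + 1) (by omega)
  have hnew : levT t1 t2 (k + 1) (j + 1) =
      if t1[k] = t2[j] then levT t1 t2 k j
      else 1 + min (min (levT t1 t2 k j) (levT t1 t2 (k + 1) j)) (levT t1 t2 k (j + 1)) := by
    rw [levT_pos t1 t2 (k+1) (j+1) (by omega) (by omega)]
    have ha : PySem.List.pyGet? t1 (((k + 1 : Nat) : Int) - 1) = some t1[k] := by
      have : (((k + 1 : Nat) : Int) - 1) = ((k : Nat) : Int) := by push_cast; ring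
      rw [this, PySem.List.pyGet?_natCast, List.getElem?_eq_getElem hk]
    have hb : PySem.List.pyGet? t2 (((j + 1 : Nat) : Int) - 1) = some t2[j] := by
      have : (((j + 1 : Nat) : Int) - 1) = ((j : Nat) : Int) := by push_cast; ring
      rw [this, PySem.List.pyGet?_natCast, List.getElem?_eq_getElem hj]
    rw [ha, hb]
    simp only [Option.some_inj]
    rcases eq_or_ne t1[k] t2[j] with h | h
    · simp only [h, if_true]
      congr 1
    · simp only [h, if_false]
      have e1 : k + 1 - 1 = k := by omega
      have e2 : j + 1 - 1 = j := by omega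
      rw [e1, e2]
      omega
  rw [h1, h2, hlast, List.range_succ (n := k + 1), List.map_append]
  rcases eq_or_ne t1[k] t2[j] with h | h
  · simp [h, hnew]
  · simp [h, hnew]

lemma pvInner (t1 t2 : List Char) (j : Nat) (hj : j < t2.length) :
    ∀ (m : List Char) (k : Nat), k ≤ t1.length → t1.drop k = m →
    (PySem.List.enumerate m (k : Int)).foldl
      (fun ds (q : Int × Char) =>
        if q.2 = t2[j] then ds ++ [PySem.List.pyGetD (pvRow t1 t2 j) q.1 0]
        else ds ++ [1 + min (min (PySem.List.pyGetD (pvRow t1 t2 j) q.1 0)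
                                 (PySem.List.pyGetD (pvRow t1 t2 j) (q.1 + 1) 0))
                            (PySem.List.pyGetD ds (-1) 0)])
      ((List.range (k + 1)).map (fun i => levT t1 t2 i (j + 1)))
    = pvRow t1 t2 (j + 1) := by
  intro m
  induction m with
  | nil =>
      intro k hk hd
      have : k = t1.length := by
        have := List.drop_eq_nil_iff.mp hd; omega
      subst this
      simp [pvRow, PySem.List.enumerate]
  | cons x m ih =>
      intro k hk hd
      have hklt : k < t1.length := by
        by_contra hh
        have h0 : t1.drop k = [] := List.drop_eq_nil_iff.mpr (by omega)
        rw [h0] at hd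
        exact List.cons_ne_nil x m hd.symm
      have hdc : t1.drop k = t1[k] :: t1.drop (k + 1) := List.drop_eq_getElem_cons hklt
      rw [hd] at hdc
      injection hdc with hx hm2
      rw [PySem.List.enumerate_cons, List.foldl_cons]
      have hcast : ((k : Int) + 1) = ((k + 1 : Nat) : Int) := by push_cast; ring
      simp only []
      subst hx
      rw [pvStep_succ t1 t2 j k hj hklt, hcast]
      exact ih (k + 1) (by omega) hm2.symm

lemma pvOuter (t1 t2 : List Char) :
    ∀ (l : List Char) (j : Nat), j ≤ t2.length → t2.drop j = l →
    (PySem.List.enumerate l (j : Int)).foldl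
      (fun dists (p : Int × Char) =>
        (PySem.List.enumerate t1).foldl
          (fun ds (q : Int × Char) =>
            if q.2 = p.2 then ds ++ [PySem.List.pyGetD dists q.1 0]
            else ds ++ [1 + min (min (PySem.List.pyGetD dists q.1 0)
                                     (PySem.List.pyGetD dists (q.1 + 1) 0))
                                (PySem.List.pyGetD ds (-1) 0)])
          [p.1 + 1])
      (pvRow t1 t2 j)
    = pvRow t1 t2 t2.length := by
  intro l
  induction l with
  | nil =>
      intro j hj hd
      have : j = t2.length := by
        have := List.drop_eq_nil_iff.mp hd; omega
      subst this
      simp [PySem.List.enumerate]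
  | cons c l ih =>
      intro j hj hd
      have hjlt : j < t2.length := by
        by_contra hh
        have h0 : t2.drop j = [] := List.drop_eq_nil_iff.mpr (by omega)
        rw [h0] at hd
        exact List.cons_ne_nil c l hd.symm
      have hdc : t2.drop j = t2[j] :: t2.drop (j + 1) := List.drop_eq_getElem_cons hjlt
      rw [hd] at hdc
      injection hdc with hx hm2
      rw [PySem.List.enumerate_cons, List.foldl_cons]
      have hcast : ((j : Int) + 1) = ((j + 1 : Nat) : Int) := by push_cast; ring
      simp only []
      subst hx
      have hinit : [(j : Int) + 1] = (List.range (0 + 1)).map (fun i => levT t1 t2 i (j + 1)) := by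
        simp [levT_zero_left]
      rw [hinit]
      have henum : PySem.List.enumerate t1 = PySem.List.enumerate t1 ((0 : Nat) : Int) := by norm_num
      rw [henum, pvInner t1 t2 j hjlt t1 0 (by omega) (by simp), hcast]
      exact ih (j + 1) (by omega) hm2.symm

lemma pvDP (t1 t2 : List Char) :
    PySem.List.pyGetD
      ((PySem.List.enumerate t2).foldl
        (fun dists (p : Int × Char) =>
          (PySem.List.enumerate t1).foldl
            (fun ds (q : Int × Char) =>
              if q.2 = p.2 then ds ++ [PySem.List.pyGetD dists q.1 0]
              else ds ++ [1 + min (min (PySem.List.pyGetD dists q.1 0)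
                                       (PySem.List.pyGetD dists (q.1 + 1) 0))
                                  (PySem.List.pyGetD ds (-1) 0)])
            [p.1 + 1])
        ((List.range (t1.length + 1)).map (fun n => (n : Int))))
      (-1) 0
    = levT t1 t2 t1.length t2.length := by
  have hinit : (List.range (t1.length + 1)).map (fun n => (n : Int)) = pvRow t1 t2 0 := by
    apply List.ext_getElem <;> simp [pvRow, levT_zero_right, ← List.map_eq_flatMap]
  have henum : PySem.List.enumerate t2 = PySem.List.enumerate t2 ((0 : Nat) : Int) := by norm_num
  rw [hinit, henum, pvOuter t1 t2 t2 0 (by omega) (by simp)]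
  have hrow : pvRow t1 t2 t2.length
      = ((List.range t1.length).map (fun i => levT t1 t2 i t2.length))
        ++ [levT t1 t2 t1.length t2.length] := by
    show (List.range (t1.length + 1)).map _ = _
    rw [List.range_succ, List.map_append]
    rfl
  rw [hrow]
  exact PySem.List.pyGetD_neg_one_append_singleton
    ((List.range t1.length).map (fun i => levT t1 t2 i t2.length)) (levT t1 t2 t1.length t2.length) 0


lemma levAlt_eq_levT (s1 s2 : String) :
    levenshteinDistance_alt s1 s2 = levT s1.toList s2.toList s1.toList.length s2.toList.length := by
  have hinv : MemoInv s1.toList s2.toList PySem.Dict.empty := by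
    intro p v h
    rw [PySem.Dict.get?_empty] at h
    exact absurd h (by simp)
  exact (levGo_correct s1.toList s2.toList s1.toList.length s2.toList.length PySem.Dict.empty hinv).1

lemma levA_eq_levT (s1 s2 : String) :
    levenshteinDistance s1 s2 = levT s1.toList s2.toList s1.toList.length s2.toList.length := by
  unfold levenshteinDistance
  by_cases h : s1.toList.length > s2.toList.length
  · simp only [h, if_true]
    rw [pvDP s2.toList s1.toList]
    exact levT_symm _ _ _ _
  · simp only [h, if_false]
    exact pvDP s1.toList s2.toList

lemma lev_eq (s1 s2 : String) : levenshteinDistance s1 s2 = levenshteinDistance_alt s1 s2 := by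
  rw [levA_eq_levT, levAlt_eq_levT]

-- A's minimum and first-argmin over a nonempty key list, as functions of head and tail
def pvAMin (term : String) (k0 : String) (rest : List String) : Int :=
  (rest.map (fun v => levenshteinDistance v term)).foldl min (levenshteinDistance k0 term)

def pvASel (term : String) (k0 : String) (rest : List String) : String :=
  ((PySem.List.index? ((k0 :: rest).map (fun v => levenshteinDistance v term)) (pvAMin term k0 rest)).bind
    (fun i => (k0 :: rest)[i]?)).getD ""

-- A's per-key distance step, for relating B's fold to A's list scans
def pvStepA (term : String) (acc : Option (String × Int)) (k : String) : Option (String × Int) :=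
  let dk := levenshteinDistance k term
  match acc with
  | none => some (k, dk)
  | some (bk, bd) => if dk < bd then some (k, dk) else some (bk, bd)

lemma pvStep_eq_pvStepA (term : String) : pvStep term = pvStepA term := by
  funext acc k
  simp [pvStep, pvStepA, lev_eq]

lemma pvAMin_mem (term k0 : String) (rest : List String) :
    pvAMin term k0 rest ∈ (k0 :: rest).map (fun v => levenshteinDistance v term) := by
  have h := PySem.List.min?_id_cons (levenshteinDistance k0 term)
    (rest.map (fun v => levenshteinDistance v term))
  have := PySem.List.min?_mem (κ := Int) h
  simpa [pvAMin] using this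

lemma pvAMin_le (term k0 : String) (rest : List String) :
    ∀ y ∈ (k0 :: rest).map (fun v => levenshteinDistance v term), pvAMin term k0 rest ≤ y := by
  have h := PySem.List.min?_id_cons (levenshteinDistance k0 term)
    (rest.map (fun v => levenshteinDistance v term))
  have := PySem.List.min?_isMin (κ := Int) h
  simpa [pvAMin] using this

lemma pvFoldl_min_min (l : List Int) (a b : Int) :
    l.foldl min (min a b) = min a (l.foldl min b) := by
  induction l generalizing b with
  | nil => rfl
  | cons c l ih =>
      simp only [List.foldl_cons, min_assoc]
      exact ih (min b c)

lemma pvAMin_cons (term k0 k1 : String) (rest : List String) :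
    pvAMin term k0 (k1 :: rest) = min (levenshteinDistance k0 term) (pvAMin term k1 rest) := by
  unfold pvAMin
  simp only [List.map_cons, List.foldl_cons]
  exact pvFoldl_min_min _ _ _

-- B's one-pass fold over the tail, started from the head, returns A's first-argmin and minimum
lemma pvFold_eq (term : String) (rest : List String) (k0 : String) :
    rest.foldl (pvStepA term) (some (k0, levenshteinDistance k0 term))
      = some (pvASel term k0 rest, pvAMin term k0 rest) := by
  induction rest generalizing k0 with
  | nil =>
      simp [pvASel, pvAMin]
  | cons k1 rest ih =>
      simp only [List.foldl_cons, pvStepA]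
      by_cases h : levenshteinDistance k1 term < levenshteinDistance k0 term
      · simp only [if_pos h]
        rw [ih k1]
        have hmle : pvAMin term k1 rest ≤ levenshteinDistance k1 term :=
          pvAMin_le term k1 rest _ (by simp)
        have hmlt : pvAMin term k1 rest < levenshteinDistance k0 term := lt_of_le_of_lt hmle h
        have hmin : pvAMin term k0 (k1 :: rest) = pvAMin term k1 rest := by
          rw [pvAMin_cons]; exact min_eq_right (le_of_lt hmlt)
        have hsel : pvASel term k0 (k1 :: rest) = pvASel term k1 rest := by
          unfold pvASel
          rw [hmin, List.map_cons,
            PySem.List.index?_cons_of_ne _ (ne_of_gt hmlt)]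
          obtain ⟨i, hi⟩ : ∃ i,
              PySem.List.index? ((k1 :: rest).map (fun v => levenshteinDistance v term))
                (pvAMin term k1 rest) = some i := by
            have := (PySem.List.index?_isSome_iff (xs := (k1 :: rest).map (fun v => levenshteinDistance v term))
              (v := pvAMin term k1 rest)).mpr (pvAMin_mem term k1 rest)
            exact Option.isSome_iff_exists.mp this
          rw [hi]
          simp
        rw [hmin, hsel]
      · simp only [if_neg h]
        rw [ih k0]
        have hk01 : levenshteinDistance k0 term ≤ levenshteinDistance k1 term := not_lt.mp h
        have hmin : pvAMin term k0 (k1 :: rest) = pvAMin term k0 rest := by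
          unfold pvAMin
          simp only [List.map_cons, List.foldl_cons]
          rw [min_eq_left hk01]
        have hsel : pvASel term k0 (k1 :: rest) = pvASel term k0 rest := by
          unfold pvASel
          rw [hmin]
          by_cases h0 : levenshteinDistance k0 term = pvAMin term k0 rest
          · simp only [List.map_cons, ← h0, PySem.List.index?_cons_self]
            simp
          · have hm0 : pvAMin term k0 rest ≤ levenshteinDistance k0 term :=
              pvAMin_le term k0 rest _ (by simp)
            have hmlt : pvAMin term k0 rest < levenshteinDistance k0 term :=
              lt_of_le_of_ne hm0 (fun heq => h0 heq.symm)
            have h1 : levenshteinDistance k1 term ≠ pvAMin term k0 rest :=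
              ne_of_gt (lt_of_lt_of_le hmlt hk01)
            have hmem : pvAMin term k0 rest ∈ rest.map (fun v => levenshteinDistance v term) := by
              have := pvAMin_mem term k0 rest
              simp only [List.map_cons, List.mem_cons] at this
              rcases this with h' | h'
              · exact absurd h'.symm h0
              · exact h'
            obtain ⟨i, hi⟩ : ∃ i,
                PySem.List.index? (rest.map (fun v => levenshteinDistance v term))
                  (pvAMin term k0 rest) = some i := by
              have := (PySem.List.index?_isSome_iff (xs := rest.map (fun v => levenshteinDistance v term))
                (v := pvAMin term k0 rest)).mpr hmem
              exact Option.isSome_iff_exists.mp this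
            rw [List.map_cons, List.map_cons,
              PySem.List.index?_cons_of_ne _ h0,
              PySem.List.index?_cons_of_ne _ h1, hi]
            rw [List.map_cons, PySem.List.index?_cons_of_ne _ h0, hi]
            simp
        rw [hmin, hsel]

lemma pv_ports_eq (term : String) (lawdict : List (String × String)) :
    search_term term lawdict = search_term_alt term lawdict := by
  unfold search_term search_term_alt
  by_cases hc : (PySem.Dict.ofList lawdict).contains term
  · simp only [hc, if_true]
  · simp only [hc, Bool.false_eq_true, if_false]
    rcases hk : (PySem.Dict.ofList lawdict).keys with _ | ⟨k0, rest⟩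
    · have hd : PySem.Dict.ofList lawdict = PySem.Dict.empty := by
        apply PySem.Dict.ext
        have : ((PySem.Dict.ofList lawdict).items.map Prod.fst) = [] := by
          simpa [PySem.Dict.keys] using hk
        simpa [PySem.Dict.empty] using List.map_eq_nil_iff.mp this
      rw [hd]
      simp [PySem.List.min?, PySem.List.index?, PySem.Dict.getD_empty]
    · simp only [List.foldl_cons, pvStep_eq_pvStepA]
      have h0 : pvStepA term none k0 = some (k0, levenshteinDistance k0 term) := rfl
      rw [h0, pvFold_eq term rest k0]
      rw [List.map_cons, PySem.List.min?_id_cons, Option.getD_some]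
      rfl

-- ===== VERDICT (by name: the statement is the Claim_ definition above) =====
theorem search_term_spec : Claim_equal_search_term := by
  intro term lawdict _ _
  unfold Spec_search_term
  exact pv_ports_eq term lawdict
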